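-- pv_equiv track=rewrite | github.com/AritzBi/SONOPA | ActivityModeling/rulesActivityModeling.py | calculate_concurrent
-- ===== SOURCE A (Python) =====
-- def calculate_concurrent(values):
-- 	lastTimeStamp=0
-- 	counter=1
-- 	biggestCounter=1
-- 	for value in values:
-- 		if(lastTimeStamp+2>=value[0]):
-- 			counter=counter+1
-- 			if counter > biggestCounter:
-- 				biggestCounter=counter
-- 		else:
-- 			counter=1
-- 		lastTimeStamp=value[0]
-- 	return biggestCounter
-- ===== SOURCE B (Python) =====
-- def calculate_concurrent(values):
--     # Two-pass decomposition: build adjacency flags, then longest True-run.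
--     prev = 0
--     flags = []
--     for v in values:
--         flags.append(prev + 2 >= v[0])
--         prev = v[0]
--     longest = 0
--     cur = 0
--     for f in flags:
--         cur = cur + 1 if f else 0
--         if cur > longest:
--             longest = cur
--     return 1 + longest
-- ===== Notes on version B (the rewrite author's own statement) =====
-- stated objective: alternative
-- what changed: Replaces A's single fused counter loop by a two-pass decomposition: first build the list of adjacent-gap flags (prev+2 >= t), then compute the longest run of consecutive True flags and return 1 + that length.
import Mathlib
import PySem

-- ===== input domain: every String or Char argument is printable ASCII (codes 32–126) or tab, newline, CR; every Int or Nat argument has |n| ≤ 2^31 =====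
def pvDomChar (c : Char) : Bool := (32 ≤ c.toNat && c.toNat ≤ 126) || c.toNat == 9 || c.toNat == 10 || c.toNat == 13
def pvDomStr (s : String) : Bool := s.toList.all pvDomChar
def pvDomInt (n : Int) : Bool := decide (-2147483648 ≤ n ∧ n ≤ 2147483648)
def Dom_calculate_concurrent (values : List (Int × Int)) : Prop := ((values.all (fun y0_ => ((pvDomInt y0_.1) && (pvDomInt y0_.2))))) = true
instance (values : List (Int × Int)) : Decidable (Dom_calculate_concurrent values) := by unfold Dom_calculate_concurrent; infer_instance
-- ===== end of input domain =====

-- B replaces A's fused counter loop by two passes (adjacency flags, then longest True-run); same O(n) cost, alternative decomposition.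

-- ===== PORT A =====
-- A's single loop over (lastTimeStamp, counter, biggestCounter)
def ccLoopA : Int → Int → Int → List (Int × Int) → Int
  | _, _, biggest, [] => biggest
  | last, counter, biggest, v :: rest =>
    if last + 2 ≥ v.1 then
      ccLoopA v.1 (counter + 1) (if counter + 1 > biggest then counter + 1 else biggest) rest
    else
      ccLoopA v.1 1 biggest rest

def calculate_concurrent (values : List (Int × Int)) : Int :=
  ccLoopA 0 1 1 values

-- ===== PORT B =====
-- pass 1: adjacency flags prev+2 >= t
def ccFlags : Int → List (Int × Int) → List Bool
  | _, [] => []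
  | prev, v :: rest => (decide (prev + 2 ≥ v.1)) :: ccFlags v.1 rest

-- pass 2: longest run of consecutive true flags
def ccRun : Int → Int → List Bool → Int
  | _, longest, [] => longest
  | cur, longest, f :: rest =>
    let cur' := if f then cur + 1 else 0
    ccRun cur' (if cur' > longest then cur' else longest) rest

def calculate_concurrent_alt (values : List (Int × Int)) : Int :=
  1 + ccRun 0 0 (ccFlags 0 values)

-- ===== PRECONDITION & SPEC =====
def Spec_calculate_concurrent (values : List (Int × Int)) (out : Int) : Prop := out = calculate_concurrent_alt values
instance (values : List (Int × Int)) (out : Int) : Decidable (Spec_calculate_concurrent values out) := by unfold Spec_calculate_concurrent; infer_instance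

-- ===== CLAIM (what is proved, stated in full; the proofs are below) =====
def Claim_equal_calculate_concurrent : Prop := ∀ (values : List (Int × Int)), Dom_calculate_concurrent values → Spec_calculate_concurrent values (calculate_concurrent values)

-- ===== LEMMAS AND PROOFS =====

-- loop correspondence: A's state (counter, biggest) is (cur+1, longest+1)
theorem ccLoopA_eq_ccRun (values : List (Int × Int)) :
    ∀ (last cur longest : Int), 0 ≤ longest →
      ccLoopA last (cur + 1) (longest + 1) values = 1 + ccRun cur longest (ccFlags last values) := by
  induction values with
  | nil => intro last cur longest _; simp [ccLoopA, ccFlags, ccRun]; omega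
  | cons v rest ih =>
    intro last cur longest hl
    by_cases h : last + 2 ≥ v.1
    · simp only [ccLoopA, ccFlags, ccRun, if_pos h, decide_eq_true h, if_true]
      have hb : (if cur + 1 + 1 > longest + 1 then cur + 1 + 1 else longest + 1)
          = (if cur + 1 > longest then cur + 1 else longest) + 1 := by omega
      rw [hb]
      exact ih v.1 (cur + 1) (if cur + 1 > longest then cur + 1 else longest) (by omega)
    · simp only [ccLoopA, ccFlags, ccRun, if_neg h, decide_eq_false h, Bool.false_eq_true,
        if_false]
      rw [show (if longest < (0:Int) then (0:Int) else longest) = longest from by omega]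
      simpa using ih v.1 0 longest hl

-- ===== VERDICT (by name: the statement is the Claim_ definition above) =====
theorem calculate_concurrent_spec : Claim_equal_calculate_concurrent := by
  intro values _
  unfold Spec_calculate_concurrent calculate_concurrent calculate_concurrent_alt
  have := ccLoopA_eq_ccRun values 0 0 0 (by omega)
  simpa using this
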